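-- pv_equiv track=rewrite | github.com/SIGMusic/aurora | software/scheduler/radio.py | rf_address
-- ===== SOURCE A (Python) =====
-- def rf_address(endpoint):
--     """Return a 40-bit nRF address."""
--     if not 0 <= endpoint < 256:
--         raise ValueError
--     address_header = "SIGM"
--     return int("0x"
--                + "".join(["%0.2x" % ord(i) for i in address_header])
--                + "%0.2x" % endpoint,
--                16)
-- ===== SOURCE B (Python) =====
-- def rf_address(endpoint):
--     """Return a 40-bit nRF address."""
--     if not 0 <= endpoint < 256:
--         raise ValueError
--     # 0x5349474d == int of "SIGM" header bytes; closed-form bitwise build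
--     return (0x5349474d << 8) | endpoint
-- ===== Notes on version B (the rewrite author's own statement) =====
-- stated objective: simpler
-- what changed: Replaces the per-character hex formatting, join and base-16 string parse with a closed-form bitwise construction (constant header shifted left 8, OR'd with the endpoint byte).
import Mathlib
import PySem

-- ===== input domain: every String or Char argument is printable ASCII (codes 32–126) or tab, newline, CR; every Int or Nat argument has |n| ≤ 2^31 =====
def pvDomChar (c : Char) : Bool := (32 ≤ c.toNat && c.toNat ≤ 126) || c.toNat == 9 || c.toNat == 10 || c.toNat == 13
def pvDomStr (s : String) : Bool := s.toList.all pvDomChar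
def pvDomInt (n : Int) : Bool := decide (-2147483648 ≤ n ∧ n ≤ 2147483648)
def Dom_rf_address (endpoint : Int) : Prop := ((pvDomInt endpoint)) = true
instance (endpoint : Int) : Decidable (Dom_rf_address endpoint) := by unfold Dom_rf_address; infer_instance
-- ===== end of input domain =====

-- B replaces A's per-character hex formatting + join + base-16 parse by a closed-form
-- bitwise construction (constant header <<8 | endpoint); objective: simpler.


-- ===== PORT A =====
-- hand-ported "%0.2x" formatting (lowercase hex, width 2 — exact for 0 ≤ n < 256,
-- the only values it receives here: ord of ASCII chars and the guarded endpoint)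
def pvHexDigit (n : Nat) : Char := if n < 10 then Char.ofNat (48 + n) else Char.ofNat (87 + n)
def pvFmt02x (n : Nat) : List Char := [pvHexDigit (n / 16 % 16), pvHexDigit (n % 16)]
-- hand-ported int(s, 16): "0x" prefix then hex digits, exact for this lowercase-hex string
def pvHexVal (c : Char) : Nat := if c.toNat ≤ 57 then c.toNat - 48 else c.toNat - 87
def pvParseHex16 (cs : List Char) : Nat := (cs.drop 2).foldl (fun acc c => acc * 16 + pvHexVal c) 0

def rf_address (endpoint : Int) : Int :=
  if ¬(0 ≤ endpoint ∧ endpoint < 256) then 0  -- Python raises ValueError here (outside Pre_)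
  else
    let address_header : String := "SIGM"
    (pvParseHex16 ("0x".toList
        ++ (address_header.toList.flatMap (fun i => pvFmt02x i.toNat))
        ++ pvFmt02x endpoint.toNat) : Int)

-- ===== PORT B =====
def rf_address_alt (endpoint : Int) : Int :=
  if ¬(0 ≤ endpoint ∧ endpoint < 256) then 0  -- Python raises ValueError here (outside Pre_)
  else Int.lor ((0x5349474d : Int) <<< 8) endpoint

-- ===== PRECONDITION & SPEC =====
-- Pre_ excludes exactly the inputs where A raises ValueError (endpoint outside [0,256))
def Pre_rf_address (endpoint : Int) : Prop := 0 ≤ endpoint ∧ endpoint < 256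
instance (endpoint : Int) : Decidable (Pre_rf_address endpoint) := by unfold Pre_rf_address; infer_instance
def pvWitness_rf_address : Int := (7)
def Spec_rf_address (endpoint : Int) (out : Int) : Prop := out = rf_address_alt endpoint
instance (endpoint : Int) (out : Int) : Decidable (Spec_rf_address endpoint out) := by unfold Spec_rf_address; infer_instance

-- ===== CLAIM (what is proved, stated in full; the proofs are below) =====
def Claim_equal_rf_address : Prop := ∀ (endpoint : Int), Dom_rf_address endpoint → Pre_rf_address endpoint → Spec_rf_address endpoint (rf_address endpoint)

-- ===== LEMMAS AND PROOFS =====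
set_option maxRecDepth 4096 in
theorem rf_address_eq_fin : ∀ n : Fin 256, rf_address (n.val : Int) = rf_address_alt (n.val : Int) := by decide

-- ===== VERDICT (by name: the statement is the Claim_ definition above) =====
theorem rf_address_spec : Claim_equal_rf_address := by
  intro e _ hpre
  obtain ⟨h1, h2⟩ := hpre
  unfold Spec_rf_address
  have he : e = ((e.toNat : Nat) : Int) := (Int.toNat_of_nonneg h1).symm
  have hlt : e.toNat < 256 := by omega
  rw [he]
  exact rf_address_eq_fin ⟨e.toNat, hlt⟩
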